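-- pv_equiv track=rewrite | github.com/meriteimwb/Edge-Software | TLCWithMqtt.py | Merit_RemoveStuffBytes
-- ===== SOURCE A (Python) =====
-- MERIT_START_BYTE 					= 0x7E
--
-- MERIT_ADDITIONAL_BYTE				= 0x10
--
-- def Merit_RemoveStuffBytes(InputList):
-- 	newList = []
-- 	Index = 0
--
-- 	while Index < len(InputList):
-- 		if(Index == len(InputList) - 1):
-- 			newList.append(InputList[Index])
-- 			break
-- 		if (InputList[Index] == MERIT_ADDITIONAL_BYTE):
-- 			checkItem = InputList[Index + 1]
-- 			if(checkItem == MERIT_ADDITIONAL_BYTE or checkItem == MERIT_START_BYTE):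
-- 				newList.append(checkItem)
-- 				Index = Index + 1
-- 		else:
-- 			newList.append(InputList[Index])
-- 		Index = Index + 1
-- 	return newList
-- ===== SOURCE B (Python) =====
-- MERIT_START_BYTE = 0x7E
-- MERIT_ADDITIONAL_BYTE = 0x10
--
-- def Merit_RemoveStuffBytes(InputList):
--     out = []
--     esc = False
--     for b in InputList:
--         if esc:
--             out.append(b)
--             esc = False
--         elif b == MERIT_ADDITIONAL_BYTE:
--             esc = True
--         else:
--             out.append(b)
--     if esc:
--         out.append(MERIT_ADDITIONAL_BYTE)
--     return out
-- ===== Notes on version B (the rewrite author's own statement) =====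
-- stated objective: simpler
-- what changed: Replaces the index-based while loop with one-step lookahead and index jumps by a forward scan over the elements with a single boolean escape-state flag (plus a final flush of a trailing lone escape); iterating directly avoids the per-step len() calls and index arithmetic.
import Mathlib
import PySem

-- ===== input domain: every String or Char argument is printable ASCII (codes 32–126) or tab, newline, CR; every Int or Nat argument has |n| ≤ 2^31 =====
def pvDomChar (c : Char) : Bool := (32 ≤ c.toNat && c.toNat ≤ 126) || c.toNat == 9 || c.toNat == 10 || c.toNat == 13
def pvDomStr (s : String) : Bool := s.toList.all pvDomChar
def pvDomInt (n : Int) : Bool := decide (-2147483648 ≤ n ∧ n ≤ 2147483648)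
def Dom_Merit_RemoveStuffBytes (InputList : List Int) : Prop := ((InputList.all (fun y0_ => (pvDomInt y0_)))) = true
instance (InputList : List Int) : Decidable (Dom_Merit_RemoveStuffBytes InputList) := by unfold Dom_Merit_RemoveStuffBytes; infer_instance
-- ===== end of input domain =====

-- B replaces A's index-based lookahead loop by a forward scan with a boolean escape flag (objective: simpler).

-- ===== PORT A =====
-- transliteration of A's while loop: Index-based scan with one-step lookahead;
-- terminates because l.length - i decreases.
def Merit_RemoveStuffBytes_loop (l : List Int) (i : Nat) (acc : List Int) : List Int :=
  if h : i < l.length then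
    if i = l.length - 1 then acc ++ [l[i]]
    else if l[i] = 16 then
      let checkItem := l.getD (i+1) 0
      if checkItem = 16 ∨ checkItem = 126 then
        Merit_RemoveStuffBytes_loop l (i+2) (acc ++ [checkItem])
      else
        Merit_RemoveStuffBytes_loop l (i+1) acc
    else Merit_RemoveStuffBytes_loop l (i+1) (acc ++ [l[i]])
  else acc
termination_by l.length - i

def Merit_RemoveStuffBytes (InputList : List Int) : List Int :=
  Merit_RemoveStuffBytes_loop InputList 0 []

-- ===== PORT B =====
-- transliteration of Source B: forward scan carrying the escape flag and the output list.
def Merit_RemoveStuffBytes_altLoop : List Int → Bool → List Int → List Int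
  | [], esc, out => if esc then out ++ [16] else out
  | b :: rest, esc, out =>
      if esc then Merit_RemoveStuffBytes_altLoop rest false (out ++ [b])
      else if b = 16 then Merit_RemoveStuffBytes_altLoop rest true out
      else Merit_RemoveStuffBytes_altLoop rest false (out ++ [b])

def Merit_RemoveStuffBytes_alt (InputList : List Int) : List Int :=
  Merit_RemoveStuffBytes_altLoop InputList false []

-- ===== PRECONDITION & SPEC =====
def Spec_Merit_RemoveStuffBytes (InputList : List Int) (out : List Int) : Prop := out = Merit_RemoveStuffBytes_alt InputList
instance (InputList : List Int) (out : List Int) : Decidable (Spec_Merit_RemoveStuffBytes InputList out) := by unfold Spec_Merit_RemoveStuffBytes; infer_instance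

-- ===== CLAIM (what is proved, stated in full; the proofs are below) =====
def Claim_equal_Merit_RemoveStuffBytes : Prop := ∀ (InputList : List Int), Dom_Merit_RemoveStuffBytes InputList → Spec_Merit_RemoveStuffBytes InputList (Merit_RemoveStuffBytes InputList)

-- ===== LEMMAS AND PROOFS =====

theorem Merit_RemoveStuffBytes_key (l : List Int) :
    ∀ n i acc, l.length - i ≤ n →
      Merit_RemoveStuffBytes_loop l i acc =
        Merit_RemoveStuffBytes_altLoop (l.drop i) false acc := by
  intro n
  induction n with
  | zero =>
      intro i acc h
      have hi : l.length ≤ i := by omega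
      rw [Merit_RemoveStuffBytes_loop]
      simp [List.drop_eq_nil_of_le hi, Merit_RemoveStuffBytes_altLoop, Nat.not_lt.mpr hi]
  | succ n ih =>
      intro i acc h
      by_cases hi : i < l.length
      · have hdrop : l.drop i = l[i] :: l.drop (i+1) := List.drop_eq_getElem_cons hi
        by_cases hlast : i = l.length - 1
        · -- last element: A appends it and stops; B sees a singleton tail
          have hdrop1 : l.drop (i+1) = [] := List.drop_eq_nil_of_le (by omega)
          rw [hdrop, hdrop1, Merit_RemoveStuffBytes_loop, dif_pos hi, if_pos hlast]
          by_cases h16 : l[i] = 16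
          · simp [Merit_RemoveStuffBytes_altLoop, h16]
          · simp [Merit_RemoveStuffBytes_altLoop, h16]
        · have hi1 : i + 1 < l.length := by omega
          have hdrop1 : l.drop (i+1) = l[i+1] :: l.drop (i+2) :=
            List.drop_eq_getElem_cons hi1
          by_cases h16 : l[i] = 16
          · -- escape byte not at the end: B consumes it then appends l[i+1]
            have hchk : l.getD (i+1) 0 = l[i+1] := List.getD_eq_getElem l 0 hi1
            have hB : Merit_RemoveStuffBytes_altLoop (l.drop i) false acc =
                Merit_RemoveStuffBytes_altLoop (l.drop (i+2)) false (acc ++ [l[i+1]]) := by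
              rw [hdrop, hdrop1]
              simp [Merit_RemoveStuffBytes_altLoop, h16]
            rw [hB, Merit_RemoveStuffBytes_loop]
            simp only [dif_pos hi, if_neg hlast, if_pos h16, hchk]
            split_ifs with hsp
            · rw [ih (i+2) (acc ++ [l[i+1]]) (by omega)]
            · have h16' : l[i+1] ≠ 16 := fun hh => hsp (Or.inl hh)
              rw [ih (i+1) acc (by omega), hdrop1]
              simp [Merit_RemoveStuffBytes_altLoop, h16']
          · -- ordinary byte: both append it and continue at i+1
            rw [Merit_RemoveStuffBytes_loop]
            simp only [dif_pos hi, if_neg hlast, if_neg h16]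
            rw [ih (i+1) (acc ++ [l[i]]) (by omega), hdrop]
            simp [Merit_RemoveStuffBytes_altLoop, h16]
      · rw [Merit_RemoveStuffBytes_loop]
        have hle : l.length ≤ i := by omega
        simp [hi, List.drop_eq_nil_of_le hle, Merit_RemoveStuffBytes_altLoop]

-- ===== VERDICT (by name: the statement is the Claim_ definition above) =====
theorem Merit_RemoveStuffBytes_spec : Claim_equal_Merit_RemoveStuffBytes := by
  intro l _
  unfold Spec_Merit_RemoveStuffBytes Merit_RemoveStuffBytes Merit_RemoveStuffBytes_alt
  simpa using Merit_RemoveStuffBytes_key l l.length 0 [] (by omega)
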